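-- pv_equiv track=rewrite | github.com/ycleo/data-structures-course | 1st_mid.py | TopKIntegerSequence
-- ===== SOURCE A (Python) =====
-- from heapq import heappop, heappush, heapify
-- from heapq import heapify, heappop, heappush
-- from heapq import heapify, heappop, heappush
--
-- def TopKIntegerSequence(matrix):
--     ans = []
--     mheap = []
--
--     for row in matrix:
--         for x in row:
--             heappush(mheap, x)
--         ans.append(heappop(mheap))
--
--     return ans
-- ===== SOURCE B (Python) =====
-- def TopKIntegerSequence(matrix):
--     # Simpler: keep the not-yet-returned elements as a plain bag; each row,
--     # add the row and extract the minimum by a linear scan (no heap).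
--     ans = []
--     remaining = []
--     for row in matrix:
--         remaining += row
--         m = min(remaining)          # ValueError when empty, where A's heappop raises
--         remaining.remove(m)
--         ans.append(m)
--     return ans
-- ===== Notes on version B (the rewrite author's own statement) =====
-- stated objective: simpler
-- what changed: Replaces the binary heap (heappush/heappop with sift-up/sift-down) by a flat multiset of the not-yet-returned elements: each row is appended wholesale and the answer element is found by min() and removed, so no heap order is ever maintained.
import Mathlib
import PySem

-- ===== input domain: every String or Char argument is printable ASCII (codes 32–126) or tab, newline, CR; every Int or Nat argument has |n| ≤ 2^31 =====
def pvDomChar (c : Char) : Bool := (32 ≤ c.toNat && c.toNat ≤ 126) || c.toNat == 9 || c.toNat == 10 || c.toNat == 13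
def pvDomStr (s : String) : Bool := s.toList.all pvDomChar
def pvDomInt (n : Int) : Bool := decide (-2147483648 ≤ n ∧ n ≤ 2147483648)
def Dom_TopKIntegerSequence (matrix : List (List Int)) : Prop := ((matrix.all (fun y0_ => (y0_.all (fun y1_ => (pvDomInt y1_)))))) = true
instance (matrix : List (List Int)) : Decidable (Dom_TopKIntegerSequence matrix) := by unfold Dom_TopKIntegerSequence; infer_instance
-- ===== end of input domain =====

-- B replaces A's binary heap by a flat bag with a linear min-scan per row (simpler, not faster);
-- A mutates its heap list in place, B only mutates its own locals — the input matrix is untouched by both.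


-- ===== PORT A =====
-- heapq._siftdown(heap, startpos, pos) after 'newitem = heap[pos]' has been read:
-- the while-loop bubbling newitem towards the root; every index access is in range, so
-- 'heap[i]' is ported as '.getD i 0'.
def pvSiftdownLoop (heap : List Int) (startpos pos : Nat) (newitem : Int) : List Int :=
  if _h : startpos < pos then
    let parentpos := (pos - 1) / 2
    let parent := heap.getD parentpos 0
    if newitem < parent then
      pvSiftdownLoop (heap.set pos parent) startpos parentpos newitem
    else
      heap.set pos newitem
  else
    heap.set pos newitem
termination_by pos
decreasing_by omega

-- heapq._siftdown(heap, startpos, pos)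
def pvSiftdown (heap : List Int) (startpos pos : Nat) : List Int :=
  pvSiftdownLoop heap startpos pos (heap.getD pos 0)

-- the while-loop of heapq._siftup: move the smaller child up until pos has no child;
-- returns the final heap contents and final pos
def pvSiftupLoop (heap : List Int) (endpos pos : Nat) : List Int × Nat :=
  let childpos := 2 * pos + 1
  if _h : childpos < endpos then
    let childpos :=
      if childpos + 1 < endpos ∧ ¬ (heap.getD childpos 0 < heap.getD (childpos + 1) 0)
      then childpos + 1 else childpos
    pvSiftupLoop (heap.set pos (heap.getD childpos 0)) endpos childpos
  else
    (heap, pos)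
termination_by endpos - pos
decreasing_by split <;> omega

-- heapq._siftup(heap, pos)
def pvSiftup (heap : List Int) (pos : Nat) : List Int :=
  let endpos := heap.length
  let startpos := pos
  let newitem := heap.getD pos 0
  let r := pvSiftupLoop heap endpos pos
  let heap2 := r.1.set r.2 newitem     -- heap[pos] = newitem
  pvSiftdown heap2 startpos r.2

-- heapq.heappush(heap, item)
def pvHeappush (heap : List Int) (item : Int) : List Int :=
  let heap := heap ++ [item]
  pvSiftdown heap 0 (heap.length - 1)

-- heapq.heappop(heap): none = IndexError on the empty heap
def pvHeappop (heap : List Int) : Option (Int × List Int) :=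
  if heap.length = 0 then none
  else
    let lastelt := heap.getD (heap.length - 1) 0     -- lastelt = heap.pop()
    let heap1 := heap.take (heap.length - 1)
    if heap1.length ≠ 0 then
      let returnitem := heap1.getD 0 0
      let heap2 := heap1.set 0 lastelt
      some (returnitem, pvSiftup heap2 0)
    else
      some (lastelt, heap1)

-- the main loop of A: for each row push all elements, then pop the minimum
def TopKIntegerSequenceGo (rows : List (List Int)) (ans : List Int) (mheap : List Int) :
    Option (List Int) :=
  match rows with
  | [] => some ans
  | row :: rest =>
    let mheap := row.foldl (fun h x => pvHeappush h x) mheap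
    match pvHeappop mheap with
    | none => none
    | some (m, mheap') => TopKIntegerSequenceGo rest (ans ++ [m]) mheap'

def TopKIntegerSequence (matrix : List (List Int)) : List Int :=
  (TopKIntegerSequenceGo matrix [] []).getD []

-- ===== PORT B =====
-- B keeps a flat bag 'remaining'; per row: remaining += row; m = min(remaining); remaining.remove(m)
def TopKIntegerSequenceAltGo (rows : List (List Int)) (ans remaining : List Int) :
    Option (List Int) :=
  match rows with
  | [] => some ans
  | row :: rest =>
    let remaining := remaining ++ row
    match PySem.List.min? remaining (fun x => x) with     -- none = ValueError of min of the empty bag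
    | none => none
    | some m =>
      match PySem.List.remove? remaining m with
      | none => none                                      -- unreachable: m ∈ remaining
      | some remaining' => TopKIntegerSequenceAltGo rest (ans ++ [m]) remaining'

def TopKIntegerSequence_alt (matrix : List (List Int)) : List Int :=
  (TopKIntegerSequenceAltGo matrix [] []).getD []

-- ===== PRECONDITION & SPEC =====
-- Pre_ excludes exactly the inputs where A raises: if some prefix of i+1 rows holds fewer than
-- i+1 elements, the (i+1)-st heappop finds an empty heap and raises IndexError (B takes the min of the empty bag and
-- raises ValueError there).
def Pre_TopKIntegerSequence (matrix : List (List Int)) : Prop :=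
  ∀ i, i < matrix.length → i < (((matrix.take (i + 1)).map (fun r => r.length)).sum)
instance (matrix : List (List Int)) : Decidable (Pre_TopKIntegerSequence matrix) := by
  unfold Pre_TopKIntegerSequence; infer_instance
def pvWitness_TopKIntegerSequence : List (List Int) := [[3, 1], [2]]
def Spec_TopKIntegerSequence (matrix : List (List Int)) (out : List Int) : Prop :=
  out = TopKIntegerSequence_alt matrix
instance (matrix : List (List Int)) (out : List Int) : Decidable (Spec_TopKIntegerSequence matrix out) := by
  unfold Spec_TopKIntegerSequence; infer_instance

-- ===== CLAIM (what is proved, stated in full; the proofs are below) =====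
def Claim_equal_TopKIntegerSequence : Prop := ∀ (matrix : List (List Int)), Dom_TopKIntegerSequence matrix → Pre_TopKIntegerSequence matrix → Spec_TopKIntegerSequence matrix (TopKIntegerSequence matrix)

-- ===== LEMMAS AND PROOFS =====

-- the heap invariant: every non-root entry dominates its parent
def pvHInv (h : List Int) : Prop :=
  ∀ i, 0 < i → i < h.length → h.getD ((i - 1) / 2) 0 ≤ h.getD i 0

-- the heap invariant with the entry at p ignored (as child and as parent)
def pvInvX (h : List Int) (p : Nat) : Prop :=
  ∀ i, 0 < i → i < h.length → i ≠ p → (i - 1) / 2 ≠ p → h.getD ((i - 1) / 2) 0 ≤ h.getD i 0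

-- v is dominated by every child of p
def pvCB (h : List Int) (p : Nat) (v : Int) : Prop :=
  ∀ j, 0 < j → j < h.length → (j - 1) / 2 = p → v ≤ h.getD j 0

lemma pv_getD_set_self {l : List Int} {i : Nat} {v : Int} (h : i < l.length) :
    (l.set i v).getD i 0 = v := by
  simp [List.getD_eq_getElem?_getD, h]

lemma pv_getD_set_ne {l : List Int} {i j : Nat} {v : Int} (h : i ≠ j) :
    (l.set i v).getD j 0 = l.getD j 0 := by
  simp [List.getD_eq_getElem?_getD, List.getElem?_set_ne h]

lemma pv_getD_mem {l : List Int} {i : Nat} (h : i < l.length) : l.getD i 0 ∈ l := by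
  rw [List.getD_eq_getElem l 0 h]; exact List.getElem_mem h

lemma pv_mset_set (h : List Int) (i : Nat) (v : Int) (hi : i < h.length) :
    ((h.set i v : List Int) : Multiset Int) + {h.getD i 0} = (↑h : Multiset Int) + {v} := by
  induction h generalizing i with
  | nil => simp at hi
  | cons a t ih =>
    cases i with
    | zero =>
      show (v ::ₘ (↑t : Multiset Int)) + {a} = (a ::ₘ ↑t) + {v}
      rw [add_comm, Multiset.singleton_add, add_comm, Multiset.singleton_add, Multiset.cons_swap]
    | succ n =>
      show (a ::ₘ (↑(t.set n v) : Multiset Int)) + {t.getD n 0} = (a ::ₘ ↑t) + {v}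
      rw [Multiset.cons_add, ih n (by simpa using hi), Multiset.cons_add]

lemma pv_sdl_mset (pos : Nat) : ∀ (h : List Int) (sp : Nat) (ni : Int), pos < h.length →
    ((pvSiftdownLoop h sp pos ni : List Int) : Multiset Int) = ↑(h.set pos ni) := by
  induction pos using Nat.strong_induction_on with
  | _ pos ih =>
    intro h sp ni hp
    rw [pvSiftdownLoop]
    dsimp only
    split_ifs with h1 h2
    · have hpp : (pos - 1) / 2 < pos := by omega
      have hpl : (pos - 1) / 2 < h.length := by omega
      rw [ih ((pos - 1) / 2) hpp _ sp ni (by simpa using hpl)]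
      -- goal: ↑((h.set pos parent).set pp ni) = ↑(h.set pos ni)
      have E1 := pv_mset_set (h.set pos (h.getD ((pos - 1) / 2) 0)) ((pos - 1) / 2) ni (by simpa using hpl)
      rw [pv_getD_set_ne (by omega)] at E1
      have E2 := pv_mset_set h pos (h.getD ((pos - 1) / 2) 0) hp
      have E3 := pv_mset_set h pos ni hp
      have : (((h.set pos (h.getD ((pos - 1) / 2) 0)).set ((pos - 1) / 2) ni : List Int) : Multiset Int)
          + ({h.getD ((pos - 1) / 2) 0} + {h.getD pos 0}) =
          ((h.set pos ni : List Int) : Multiset Int) + ({h.getD ((pos - 1) / 2) 0} + {h.getD pos 0}) := by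
        calc (((h.set pos (h.getD ((pos - 1) / 2) 0)).set ((pos - 1) / 2) ni : List Int) : Multiset Int)
            + ({h.getD ((pos - 1) / 2) 0} + {h.getD pos 0})
            = ((((h.set pos (h.getD ((pos - 1) / 2) 0)).set ((pos - 1) / 2) ni : List Int) : Multiset Int)
              + {h.getD ((pos - 1) / 2) 0}) + {h.getD pos 0} := by rw [add_assoc]
          _ = (((h.set pos (h.getD ((pos - 1) / 2) 0) : List Int) : Multiset Int) + {ni}) + {h.getD pos 0} := by rw [E1]
          _ = (((h.set pos (h.getD ((pos - 1) / 2) 0) : List Int) : Multiset Int) + {h.getD pos 0}) + {ni} := by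
              rw [add_assoc, add_assoc, add_comm ({ni} : Multiset Int)]
          _ = ((↑h : Multiset Int) + {h.getD ((pos - 1) / 2) 0}) + {ni} := by rw [E2]
          _ = ((↑h : Multiset Int) + {ni}) + {h.getD ((pos - 1) / 2) 0} := by
              rw [add_assoc, add_assoc, add_comm ({ni} : Multiset Int)]
          _ = (((h.set pos ni : List Int) : Multiset Int) + {h.getD pos 0}) + {h.getD ((pos - 1) / 2) 0} := by rw [E3]
          _ = ((h.set pos ni : List Int) : Multiset Int) + ({h.getD ((pos - 1) / 2) 0} + {h.getD pos 0}) := by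
              rw [add_assoc, add_comm ({h.getD pos 0} : Multiset Int)]
      exact add_right_cancel this
    · rfl
    · rfl

lemma pv_sdl_inv (pos : Nat) : ∀ (h : List Int) (ni : Int), pos < h.length →
    pvInvX h pos → pvCB h pos ni → (0 < pos → pvCB h pos (h.getD ((pos - 1) / 2) 0)) →
    pvHInv (pvSiftdownLoop h 0 pos ni) := by
  induction pos using Nat.strong_induction_on with
  | _ pos ih =>
    intro h ni hp hx hcb hpcb
    rw [pvSiftdownLoop]
    dsimp only
    split_ifs with h1 h2
    · -- ni < parent: move parent down, recurse at pp
      have hppl : (pos - 1) / 2 < h.length := by omega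
      apply ih ((pos - 1) / 2) (by omega) _ ni (by simpa using hppl)
      · -- pvInvX (h.set pos parent) pp
        intro i hi0 hil hine hipar
        simp only [List.length_set] at hil
        by_cases hipos : i = pos
        · exact absurd (by rw [hipos]) hipar
        · by_cases hpar : (i - 1) / 2 = pos
          · rw [hpar, pv_getD_set_self hp, pv_getD_set_ne (Ne.symm hipos)]
            exact hpcb h1 i hi0 hil hpar
          · rw [pv_getD_set_ne (fun e => hpar e.symm), pv_getD_set_ne (Ne.symm hipos)]
            exact hx i hi0 hil hipos hpar
      · -- pvCB (h.set pos parent) pp ni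
        intro j hj0 hjl hjpar
        simp only [List.length_set] at hjl
        by_cases hjpos : j = pos
        · rw [hjpos, pv_getD_set_self hp]; exact le_of_lt h2
        · rw [pv_getD_set_ne (Ne.symm hjpos)]
          have hne : (j - 1) / 2 ≠ pos := by omega
          have hj2 := hx j hj0 hjl hjpos hne
          rw [hjpar] at hj2
          exact le_trans (le_of_lt h2) hj2
      · -- parent-of-hole bound
        intro hpp0 j hj0 hjl hjpar
        simp only [List.length_set] at hjl
        have hgp : ((pos - 1) / 2 - 1) / 2 ≠ pos := by omega
        rw [pv_getD_set_ne (fun e => hgp e.symm)]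
        have hpple : h.getD (((pos - 1) / 2 - 1) / 2) 0 ≤ h.getD ((pos - 1) / 2) 0 :=
          hx ((pos - 1) / 2) hpp0 hppl (by omega) hgp
        by_cases hjpos : j = pos
        · rw [hjpos, pv_getD_set_self hp]; exact hpple
        · rw [pv_getD_set_ne (Ne.symm hjpos)]
          have hj2 := hx j hj0 hjl hjpos (by omega)
          rw [hjpar] at hj2
          exact le_trans hpple hj2
    · -- exit: parent ≤ ni, place ni at pos
      intro i hi0 hil
      simp only [List.length_set] at hil
      by_cases hipos : i = pos
      · subst hipos
        rw [pv_getD_set_ne (by omega : i ≠ (i - 1) / 2), pv_getD_set_self hp]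
        exact not_lt.mp h2
      · by_cases hpar : (i - 1) / 2 = pos
        · rw [hpar, pv_getD_set_self hp, pv_getD_set_ne (Ne.symm hipos)]
          exact hcb i hi0 hil hpar
        · rw [pv_getD_set_ne (fun e => hpar e.symm), pv_getD_set_ne (Ne.symm hipos)]
          exact hx i hi0 hil hipos hpar
    · -- pos = 0
      have hpos0 : pos = 0 := by omega
      subst hpos0
      intro i hi0 hil
      simp only [List.length_set] at hil
      by_cases hpar : (i - 1) / 2 = 0
      · rw [hpar, pv_getD_set_self hp, pv_getD_set_ne (by omega : (0:Nat) ≠ i)]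
        exact hcb i hi0 hil hpar
      · rw [pv_getD_set_ne (fun e => hpar e.symm), pv_getD_set_ne (by omega : (0:Nat) ≠ i)]
        exact hx i hi0 hil (by omega) hpar

lemma pv_sul_spec (k : Nat) : ∀ (h : List Int) (pos : Nat), h.length - pos ≤ k →
    pos < h.length → pvInvX h pos → (0 < pos → pvCB h pos (h.getD ((pos - 1) / 2) 0)) →
    (pvSiftupLoop h h.length pos).1.length = h.length ∧
    (pvSiftupLoop h h.length pos).2 < h.length ∧
    h.length ≤ 2 * (pvSiftupLoop h h.length pos).2 + 1 ∧
    pvInvX (pvSiftupLoop h h.length pos).1 (pvSiftupLoop h h.length pos).2 ∧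
    ((pvSiftupLoop h h.length pos).1 : Multiset Int) + {h.getD pos 0} =
      (↑h : Multiset Int) + {(pvSiftupLoop h h.length pos).1.getD (pvSiftupLoop h h.length pos).2 0} := by
  induction k with
  | zero => intro h pos hk hp _ _; omega
  | succ k ih =>
    intro h pos hk hp hx hpcb
    by_cases hc : 2 * pos + 1 < h.length
    · -- there is a child: one common argument for either selected child c
      have main : ∀ c : Nat, pos < c → c < h.length → (c - 1) / 2 = pos →
          (∀ j, 0 < j → j < h.length → (j - 1) / 2 = pos → h.getD c 0 ≤ h.getD j 0) →
          (pvSiftupLoop (h.set pos (h.getD c 0)) h.length c).1.length = h.length ∧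
          (pvSiftupLoop (h.set pos (h.getD c 0)) h.length c).2 < h.length ∧
          h.length ≤ 2 * (pvSiftupLoop (h.set pos (h.getD c 0)) h.length c).2 + 1 ∧
          pvInvX (pvSiftupLoop (h.set pos (h.getD c 0)) h.length c).1
            (pvSiftupLoop (h.set pos (h.getD c 0)) h.length c).2 ∧
          ((pvSiftupLoop (h.set pos (h.getD c 0)) h.length c).1 : Multiset Int) + {h.getD pos 0} =
            (↑h : Multiset Int) +
              {(pvSiftupLoop (h.set pos (h.getD c 0)) h.length c).1.getD
                (pvSiftupLoop (h.set pos (h.getD c 0)) h.length c).2 0} := by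
        intro c hposc hcl hcpar hcmin
        have hlen : (h.set pos (h.getD c 0)).length = h.length := by simp
        have hx' : pvInvX (h.set pos (h.getD c 0)) c := by
          intro i hi0 hil hine hipar
          simp only [List.length_set] at hil
          by_cases hipos : i = pos
          · subst hipos
            rw [pv_getD_set_self hp]
            rcases Nat.eq_zero_or_pos i with h0 | hipos0
            · omega
            · rw [pv_getD_set_ne (by omega : i ≠ (i - 1) / 2)]
              exact hpcb hipos0 c (by omega) hcl hcpar
          · by_cases hpar : (i - 1) / 2 = pos
            · rw [hpar, pv_getD_set_self hp, pv_getD_set_ne (Ne.symm hipos)]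
              exact hcmin i hi0 hil hpar
            · rw [pv_getD_set_ne (fun e => hpar e.symm), pv_getD_set_ne (Ne.symm hipos)]
              exact hx i hi0 hil hipos hpar
        have hpcb' : 0 < c → pvCB (h.set pos (h.getD c 0)) c
            ((h.set pos (h.getD c 0)).getD ((c - 1) / 2) 0) := by
          intro _ j hj0 hjl hjpar
          simp only [List.length_set] at hjl
          rw [hcpar, pv_getD_set_self hp, pv_getD_set_ne (by omega : pos ≠ j)]
          have hj2 := hx j hj0 hjl (by omega) (by omega)
          rw [hjpar] at hj2
          exact hj2
        have hrec := ih (h.set pos (h.getD c 0)) c (by rw [hlen]; omega) (by rw [hlen]; omega) hx' hpcb'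
        rw [hlen] at hrec
        obtain ⟨r1, r2, r3, r4, r5⟩ := hrec
        refine ⟨r1, r2, r3, r4, ?_⟩
        rw [pv_getD_set_ne (by omega : pos ≠ c)] at r5
        have E := pv_mset_set h pos (h.getD c 0) hp
        set M := ((pvSiftupLoop (h.set pos (h.getD c 0)) h.length c).1 : Multiset Int) with hM
        set w := (pvSiftupLoop (h.set pos (h.getD c 0)) h.length c).1.getD
          (pvSiftupLoop (h.set pos (h.getD c 0)) h.length c).2 0 with hw
        have : M + {h.getD pos 0} + {h.getD c 0} = ((↑h : Multiset Int) + {w}) + {h.getD c 0} := by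
          calc M + {h.getD pos 0} + {h.getD c 0}
              = (M + {h.getD c 0}) + {h.getD pos 0} := by
                rw [add_assoc, add_assoc, add_comm ({h.getD pos 0} : Multiset Int)]
            _ = (((h.set pos (h.getD c 0) : List Int) : Multiset Int) + {w}) + {h.getD pos 0} := by rw [r5]
            _ = (((h.set pos (h.getD c 0) : List Int) : Multiset Int) + {h.getD pos 0}) + {w} := by
                rw [add_assoc, add_assoc, add_comm ({w} : Multiset Int)]
            _ = ((↑h : Multiset Int) + {h.getD c 0}) + {w} := by rw [E]
            _ = ((↑h : Multiset Int) + {w}) + {h.getD c 0} := by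
                rw [add_assoc, add_assoc, add_comm ({w} : Multiset Int)]
        exact add_right_cancel this
      rw [pvSiftupLoop]
      dsimp only
      rw [dif_pos hc]
      by_cases hsel : 2 * pos + 1 + 1 < h.length ∧
          ¬ h.getD (2 * pos + 1) 0 < h.getD (2 * pos + 1 + 1) 0
      · rw [if_pos hsel]
        refine main (2 * pos + 2) (by omega) (by omega) (by omega) ?_
        intro j hj0 hjl hjpar
        have : j = 2 * pos + 1 ∨ j = 2 * pos + 2 := by omega
        rcases this with e | e <;> subst e
        · exact not_lt.mp hsel.2
        · exact le_refl _
      · rw [if_neg hsel]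
        refine main (2 * pos + 1) (by omega) hc (by omega) ?_
        intro j hj0 hjl hjpar
        have : j = 2 * pos + 1 ∨ j = 2 * pos + 2 := by omega
        rcases this with e | e <;> subst e
        · exact le_refl _
        · rcases not_and_or.mp hsel with h' | h'
          · omega
          · exact le_of_lt (not_not.mp h')
    · -- no child: the loop exits immediately
      rw [pvSiftupLoop]
      dsimp only
      rw [dif_neg hc]
      exact ⟨rfl, hp, by omega, hx, rfl⟩

lemma pv_root_min {h : List Int} (hv : pvHInv h) : ∀ x ∈ h, h.getD 0 0 ≤ x := by
  have key : ∀ i, i < h.length → h.getD 0 0 ≤ h.getD i 0 := by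
    intro i
    induction i using Nat.strong_induction_on with
    | _ i ih =>
      intro hil
      rcases Nat.eq_zero_or_pos i with h0 | h0
      · subst h0; exact le_refl _
      · exact le_trans (ih ((i - 1) / 2) (by omega) (by omega)) (hv i h0 hil)
  intro x hx
  obtain ⟨i, hi, e⟩ := List.mem_iff_getElem.mp hx
  have := key i hi
  rwa [List.getD_eq_getElem h 0 hi, e] at this

lemma pv_getD_append_last (h : List Int) (x : Int) : (h ++ [x]).getD h.length 0 = x := by
  simp [List.getD_eq_getElem?_getD]

lemma pv_getD_append {l t : List Int} {i : Nat} (h : i < l.length) :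
    (l ++ t).getD i 0 = l.getD i 0 := by
  simp [List.getD_eq_getElem?_getD, List.getElem?_append_left h]

lemma pv_push_mset (h : List Int) (x : Int) :
    ((pvHeappush h x : List Int) : Multiset Int) = x ::ₘ ↑h := by
  unfold pvHeappush pvSiftdown
  dsimp only
  have hlen : (h ++ [x]).length - 1 = h.length := by simp
  rw [hlen, pv_getD_append_last,
    pv_sdl_mset h.length (h ++ [x]) 0 x (by simp)]
  have E := pv_mset_set (h ++ [x]) h.length x (by simp)
  rw [pv_getD_append_last] at E
  have := add_right_cancel E
  rw [this, ← Multiset.coe_add]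
  rw [show ((([x] : List Int)) : Multiset Int) = ({x} : Multiset Int) from rfl,
    add_comm, Multiset.singleton_add]

lemma pv_push_inv {h : List Int} (x : Int) (hv : pvHInv h) : pvHInv (pvHeappush h x) := by
  unfold pvHeappush pvSiftdown
  dsimp only
  have hlen : (h ++ [x]).length - 1 = h.length := by simp
  rw [hlen]
  apply pv_sdl_inv h.length (h ++ [x]) _ (by simp)
  · intro i hi0 hil hine hipar
    simp only [List.length_append, List.length_cons, List.length_nil] at hil
    have hil' : i < h.length := by omega
    rw [pv_getD_append hil', pv_getD_append (by omega : (i - 1) / 2 < h.length)]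
    exact hv i hi0 hil'
  · intro j hj0 hjl hjpar
    simp only [List.length_append, List.length_cons, List.length_nil] at hjl
    omega
  · intro _ j hj0 hjl hjpar
    simp only [List.length_append, List.length_cons, List.length_nil] at hjl
    omega

lemma pv_getD_take {l : List Int} {i j : Nat} (h : i < j) :
    (l.take j).getD i 0 = l.getD i 0 := by
  simp [List.getD_eq_getElem?_getD, h]

lemma pv_take_concat (l : List Int) (n : Nat) (h : l.length = n + 1) :
    l.take n ++ [l.getD n 0] = l := by
  rw [List.getD_eq_getElem l 0 (by omega), ← List.concat_eq_append, List.take_concat_get]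
  exact List.take_of_length_le (by omega)

lemma pv_pop_spec {h : List Int} (hv : pvHInv h) (hne : h ≠ []) :
    ∃ h', pvHeappop h = some (h.getD 0 0, h') ∧ pvHInv h' ∧
      (h.getD 0 0) ::ₘ (↑h' : Multiset Int) = ↑h := by
  have hn : 0 < h.length := List.length_pos_iff.mpr hne
  unfold pvHeappop
  rw [if_neg (by omega)]
  dsimp only
  by_cases h2 : h.length - 1 = 0
  · -- singleton heap
    obtain ⟨a, rfl⟩ := List.length_eq_one_iff.mp (by omega : h.length = 1)
    refine ⟨[], by simp, fun i hi0 hil => by simp at hil, by simp⟩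
  · rw [if_pos (by simp; omega)]
    set n := h.length with hnn
    set lastelt := h.getD (n - 1) 0 with hle
    set heap1 := h.take (n - 1) with hh1
    have hl1 : heap1.length = n - 1 := by simp [hh1]; omega
    set heap2 := heap1.set 0 lastelt with hh2
    have hl2 : heap2.length = n - 1 := by simp [hh2, hl1]
    have h10 : heap1.getD 0 0 = h.getD 0 0 := pv_getD_take (by omega)
    -- unfold pvSiftup
    unfold pvSiftup
    dsimp only
    set ni := heap2.getD 0 0 with hni
    have hni' : ni = lastelt := pv_getD_set_self (by omega)
    -- siftup loop spec
    have hx2 : pvInvX heap2 0 := by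
      intro i hi0 hil hine hipar
      rw [hl2] at hil
      rw [hh2, pv_getD_set_ne (by omega : (0:Nat) ≠ i), pv_getD_set_ne (by omega : (0:Nat) ≠ (i - 1) / 2),
        hh1, pv_getD_take (by omega), pv_getD_take (by omega)]
      exact hv i hi0 (by omega)
    have hsul := pv_sul_spec heap2.length heap2 0 (by omega) (by omega) hx2 (by omega)
    obtain ⟨r1, r2, r3, r4, r5⟩ := hsul
    set r := pvSiftupLoop heap2 heap2.length 0 with hr
    -- the final siftdown
    unfold pvSiftdown
    have hr2l : r.2 < (r.1.set r.2 ni).length := by simp; omega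
    have hset : (r.1.set r.2 ni).getD r.2 0 = ni := pv_getD_set_self (by omega)
    rw [hset, h10]
    refine ⟨_, rfl, ?_, ?_⟩
    · -- heap invariant of the result
      apply pv_sdl_inv r.2 _ _ hr2l
      · intro i hi0 hil hine hipar
        simp only [List.length_set] at hil
        rw [pv_getD_set_ne (Ne.symm hine), pv_getD_set_ne (fun e => hipar e.symm)]
        exact r4 i hi0 (by omega) hine hipar
      · intro j hj0 hjl hjpar
        simp only [List.length_set] at hjl
        omega
      · intro _ j hj0 hjl hjpar
        simp only [List.length_set] at hjl
        omega
    · -- multiset accounting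
      rw [pv_sdl_mset r.2 _ 0 ni (by simp; omega)]
      have E3 := pv_mset_set (r.1.set r.2 ni) r.2 ni (by simp; omega)
      rw [hset] at E3
      have e31 : ((((r.1.set r.2 ni).set r.2 ni : List Int)) : Multiset Int) = ↑(r.1.set r.2 ni) :=
        add_right_cancel E3
      have E2 := pv_mset_set r.1 r.2 ni (by omega)
      -- ↑(r.1.set r.2 ni) = ↑heap2
      have er5 : (↑r.1 : Multiset Int) + {lastelt} = ↑heap2 + {r.1.getD r.2 0} := by
        rw [← hni']
        exact r5
      have e2 : ((r.1.set r.2 ni : List Int) : Multiset Int) = ↑heap2 := by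
        have : ((r.1.set r.2 ni : List Int) : Multiset Int) + {r.1.getD r.2 0} + {lastelt}
            = (↑heap2 : Multiset Int) + {r.1.getD r.2 0} + {lastelt} := by
          calc ((r.1.set r.2 ni : List Int) : Multiset Int) + {r.1.getD r.2 0} + {lastelt}
              = ((↑r.1 : Multiset Int) + {ni}) + {lastelt} := by rw [E2]
            _ = ((↑r.1 : Multiset Int) + {lastelt}) + {ni} := by
                rw [add_assoc, add_assoc, add_comm ({ni} : Multiset Int)]
            _ = ((↑heap2 : Multiset Int) + {r.1.getD r.2 0}) + {ni} := by rw [er5]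
            _ = (↑heap2 : Multiset Int) + {r.1.getD r.2 0} + {lastelt} := by rw [hni']
        exact add_right_cancel (add_right_cancel this)
      -- ↑heap2 + {h.getD 0} = ↑h
      have E1 := pv_mset_set heap1 0 lastelt (by omega)
      rw [h10] at E1
      have hsplit : (↑heap1 : Multiset Int) + {lastelt} = ↑h := by
        have e : heap1 ++ [lastelt] = h := pv_take_concat h (n - 1) (by omega)
        rw [← e, ← Multiset.coe_add]
        rfl
      rw [e31, e2]
      rw [show ∀ (a : Int) (s : Multiset Int), a ::ₘ s = s + {a} from fun a s => by
        rw [add_comm, Multiset.singleton_add]]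
      rw [E1, hsplit]

lemma pv_pushrow (row : List Int) : ∀ (h : List Int), pvHInv h →
    pvHInv (row.foldl (fun h x => pvHeappush h x) h) ∧
    ((row.foldl (fun h x => pvHeappush h x) h : List Int) : Multiset Int) = ↑h + ↑row := by
  induction row with
  | nil => intro h hv; exact ⟨hv, by simp⟩
  | cons x t ih =>
    intro h hv
    obtain ⟨iv, im⟩ := ih (pvHeappush h x) (pv_push_inv x hv)
    refine ⟨iv, ?_⟩
    rw [List.foldl_cons] at *
    rw [im, pv_push_mset]
    show (x ::ₘ (↑h : Multiset Int)) + ↑t = ↑h + ↑(x :: t)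
    rw [show ((x :: t : List Int) : Multiset Int) = x ::ₘ ↑t from rfl,
      Multiset.cons_add, add_comm (↑h : Multiset Int) (x ::ₘ (↑t : Multiset Int)),
      Multiset.cons_add, add_comm (↑t : Multiset Int) (↑h : Multiset Int)]

lemma pv_go_eq (rows : List (List Int)) : ∀ (ans hA hB : List Int),
    (↑hA : Multiset Int) = ↑hB → pvHInv hA →
    TopKIntegerSequenceGo rows ans hA = TopKIntegerSequenceAltGo rows ans hB := by
  induction rows with
  | nil => intro ans hA hB _ _; rfl
  | cons row rest ih =>
    intro ans hA hB hm hv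
    rw [TopKIntegerSequenceGo, TopKIntegerSequenceAltGo]
    obtain ⟨hv', hm'⟩ := pv_pushrow row hA hv
    set hA' := row.foldl (fun h x => pvHeappush h x) hA with hhA
    have hmm : (↑hA' : Multiset Int) = ↑(hB ++ row) := by
      rw [hm', hm, Multiset.coe_add]
    by_cases hz : hA' = []
    · -- both raise
      have hBz : hB ++ row = [] := by
        rw [hz] at hmm
        exact (Multiset.coe_eq_coe.mp hmm).symm.eq_nil
      rw [hz, hBz]
      rfl
    · obtain ⟨h', hpop, hv2, hms⟩ := pv_pop_spec hv' hz
      rw [hpop]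
      have hBz : hB ++ row ≠ [] := by
        intro e
        rw [e] at hmm
        exact hz (Multiset.coe_eq_coe.mp hmm).eq_nil
      cases hmin : PySem.List.min? (hB ++ row) (fun x => x) with
      | none => exact absurd ((PySem.List.min?_eq_none_iff _ _).mp hmin) hBz
      | some m =>
        have hmmem : m ∈ hB ++ row := PySem.List.min?_mem hmin
        have hme : m = hA'.getD 0 0 := by
          have h1 : hA'.getD 0 0 ≤ m := by
            apply pv_root_min hv'
            have : m ∈ (↑hA' : Multiset Int) := by rw [hmm]; exact hmmem
            exact Multiset.mem_coe.mp this
          have h2 : m ≤ hA'.getD 0 0 := by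
            have ha : hA'.getD 0 0 ∈ hB ++ row := by
              have : (hA'.getD 0 0 : Int) ∈ (↑(hB ++ row) : Multiset Int) := by
                rw [← hmm]
                exact Multiset.mem_coe.mpr (pv_getD_mem (List.length_pos_iff.mpr hz))
              exact Multiset.mem_coe.mp this
            exact PySem.List.min?_isMin hmin _ ha
          exact le_antisymm h2 h1
        dsimp only
        rw [PySem.List.remove?_eq_some_erase _ m hmmem]
        rw [← hme]
        dsimp only
        apply ih
        · -- multisets of the rests agree
          rw [← Multiset.coe_erase]
          rw [← hmm, ← hms, hme]
          rw [Multiset.erase_cons_head]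
        · exact hv2

-- ===== VERDICT (by name: the statement is the Claim_ definition above) =====
theorem TopKIntegerSequence_spec : Claim_equal_TopKIntegerSequence := by
  intro matrix _ _
  unfold Spec_TopKIntegerSequence TopKIntegerSequence TopKIntegerSequence_alt
  rw [pv_go_eq matrix [] [] [] rfl (by intro i hi hlen; simp at hlen)]
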